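-- pv_equiv track=rewrite | github.com/Aniket886/password_toolkit | src/security_analyzer.py | _find_repetitions
-- ===== SOURCE A (Python) =====
-- from typing import Dict, List, Tuple, Optional
--
-- def _find_repetitions(password: str) -> List[str]:
--     """Find repeated characters in password."""
--     repetitions = []
--
--     i = 0
--     while i < len(password):
--         char = password[i]
--         count = 1
--
--         while i + count < len(password) and password[i + count] == char:
--             count += 1
--
--         if count >= 3:
--             repetitions.append(char * count)
--
--         i += count
--
--     return repetitions
-- ===== SOURCE B (Python) =====
-- from typing import Dict, List, Tuple, Optional
--
--
-- def _find_repetitions(password: str) -> List[str]: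
--     """Find repeated characters in password (runs of 3+ identical chars).
--
--     Staged approach: first compute all run-boundary indices (positions where a
--     new maximal run starts, plus the end position), then slice the password
--     between consecutive boundaries and keep the slices of length >= 3.
--     """
--     n = len(password)
--     bounds = [i for i in range(n + 1)
--               if i == 0 or i == n or password[i] != password[i - 1]]
--     return [password[a:b] for a, b in zip(bounds, bounds[1:]) if b - a >= 3]
-- ===== Notes on version B (the rewrite author's own statement) =====
-- stated objective: alternative
-- what changed: B replaces A's nested cursor-advancing while loops with two staged passes: it first computes the list of run-boundary indices (start positions of maximal runs plus the end position) and then slices the password between consecutive boundary pairs, keeping slices of length >= 3.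
import Mathlib
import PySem

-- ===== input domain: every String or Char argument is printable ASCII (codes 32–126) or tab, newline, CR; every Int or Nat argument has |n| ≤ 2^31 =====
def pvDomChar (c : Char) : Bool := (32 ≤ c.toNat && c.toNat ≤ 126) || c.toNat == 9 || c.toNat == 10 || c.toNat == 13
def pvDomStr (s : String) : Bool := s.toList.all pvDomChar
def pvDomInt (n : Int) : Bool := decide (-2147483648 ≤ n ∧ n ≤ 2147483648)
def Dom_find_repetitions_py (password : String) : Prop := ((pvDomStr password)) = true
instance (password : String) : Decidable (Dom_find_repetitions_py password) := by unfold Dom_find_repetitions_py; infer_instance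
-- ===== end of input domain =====

-- B replaces A's nested cursor-advancing while loops with two staged passes
-- (boundary indices, then slicing between consecutive boundaries); equal return
-- value proved on the whole domain.


-- ===== PORT A =====
-- inner while loop of A: number of leading characters of the list equal to `c`
def find_reps_run_count (c : Char) : List Char → Nat
  | [] => 0
  | x :: xs => if x == c then find_reps_run_count c xs + 1 else 0

-- outer while loop of A: char = current character, count = 1 + run length,
-- append char*count if count >= 3, advance the cursor by count
def find_reps_go : List Char → List String
  | [] => []
  | c :: rest =>
    let count := find_reps_run_count c rest + 1
    (if 3 ≤ count then [String.mk (List.replicate count c)] else []) ++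
      find_reps_go (rest.drop (count - 1))
termination_by l => l.length
decreasing_by simp

def find_repetitions_py (password : String) : List String :=
  find_reps_go password.toList

-- ===== PORT B =====
-- Source B comprehension condition: i == 0 or i == n or password[i] != password[i - 1]
-- (getD is exact here: the comparison is only reached for 1 <= i <= n - 1)
def pvBound (s : List Char) (n i : Nat) : Bool :=
  i == 0 || i == n || (s.getD i ' ' != s.getD (i - 1) ' ')

-- Source B: bounds = [i for i in range(n + 1) if i == 0 or i == n or password[i] != password[i-1]]
def pvBounds (s : List Char) : List Nat :=
  (List.range (s.length + 1)).filter (pvBound s s.length)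

-- Source B: [password[a:b] for a, b in zip(bounds, bounds[1:]) if b - a >= 3]
-- (password[a:b] with 0 <= a <= b <= n is exactly (drop a).take (b - a))
def find_repetitions_py_alt (password : String) : List String :=
  let s := password.toList
  let bounds := pvBounds s
  ((bounds.zip bounds.tail).filter (fun p => 3 ≤ p.2 - p.1)).map
    (fun p => String.mk ((s.drop p.1).take (p.2 - p.1)))

-- ===== PRECONDITION & SPEC =====
def Spec_find_repetitions_py (password : String) (out : List String) : Prop := out = find_repetitions_py_alt password
instance (password : String) (out : List String) : Decidable (Spec_find_repetitions_py password out) := by unfold Spec_find_repetitions_py; infer_instance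

-- ===== CLAIM (what is proved, stated in full; the proofs are below) =====
def Claim_equal_find_repetitions_py : Prop := ∀ (password : String), Dom_find_repetitions_py password → Spec_find_repetitions_py password (find_repetitions_py password)

-- ===== LEMMAS AND PROOFS =====

-- B's list-level computation, to reason about
def find_reps_alt_list (s : List Char) : List String :=
  ((pvBounds s).zip (pvBounds s).tail).filter (fun p => 3 ≤ p.2 - p.1) |>.map
    (fun p => String.mk ((s.drop p.1).take (p.2 - p.1)))

lemma run_count_eq_takeWhile (c : Char) (l : List Char) :
    find_reps_run_count c l = (l.takeWhile (· == c)).length := by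
  induction l with
  | nil => rfl
  | cons x xs ih =>
    by_cases h : x == c <;> simp [find_reps_run_count, List.takeWhile, h, ih]

lemma drop_run_count (c : Char) (l : List Char) :
    l.drop (find_reps_run_count c l) = l.dropWhile (· == c) := by
  induction l with
  | nil => rfl
  | cons x xs ih =>
    by_cases h : x == c <;> simp [find_reps_run_count, List.dropWhile, h, ih]

-- the head of bounds is always 0
lemma pvBounds_head (s : List Char) :
    pvBounds s = 0 :: ((List.range s.length).map (1 + ·)).filter (pvBound s s.length) := by
  unfold pvBounds
  rw [show s.length + 1 = 1 + s.length by omega, List.range_add, List.filter_append]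
  rw [List.range_one]
  simp [pvBound]

-- key decomposition of the boundary list over the first maximal run
lemma pvBounds_cons (c : Char) (rest : List Char) :
    pvBounds (c :: rest)
      = 0 :: (pvBounds (rest.dropWhile (· == c))).map
          (· + ((rest.takeWhile (· == c)).length + 1)) := by
  set w := rest.takeWhile (· == c) with hw
  set t := rest.dropWhile (· == c) with ht
  set k := w.length + 1 with hk
  have hs : c :: rest = (c :: w) ++ t := by
    simp [hw, ht, List.takeWhile_append_dropWhile]
  have hwc : ∀ x ∈ (c :: w), x = c := by
    intro x hx
    rcases List.mem_cons.mp hx with h | h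
    · exact h
    · rw [hw] at h
      have h2 : (x == c) = true := List.mem_takeWhile_imp (p := fun y => y == c) h
      exact beq_iff_eq.mp h2
  have hlen : (c :: rest).length = k + t.length := by
    rw [hs]; simp [hk]; omega
  have hA : ∀ i, i < k → (c :: rest).getD i ' ' = c := by
    intro i hi
    have h2 : i < (c :: w).length := by simp only [List.length_cons]; omega
    rw [hs, List.getD_eq_getElem?_getD, List.getElem?_append_left h2,
      List.getElem?_eq_getElem h2]
    exact hwc _ (List.getElem_mem h2)
  have hB : ∀ j, (c :: rest).getD (k + j) ' ' = t.getD j ' ' := by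
    intro j
    have h2 : (c :: w).length ≤ k + j := by simp [hk]
    rw [hs, List.getD_eq_getElem?_getD, List.getElem?_append_right h2,
      List.getD_eq_getElem?_getD]
    congr 1
    simp [hk]
  have hng : (c :: rest).length + 1 = k + (t.length + 1) := by omega
  have h1 : List.filter (pvBound (c :: rest) (c :: rest).length) (List.range k) = [0] := by
    rw [hk, show w.length + 1 = 1 + w.length by omega, List.range_add, List.filter_append,
      List.range_one]
    have hz : List.filter (pvBound (c :: rest) (c :: rest).length) [0] = [0] := by
      simp [pvBound]
    rw [hz, List.filter_map, List.filter_eq_nil_iff.mpr ?_, List.map_nil, List.append_nil]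
    intro a ha
    simp only [List.mem_range] at ha
    have e1 : (c :: rest).getD (1 + a) ' ' = c := hA _ (by omega)
    have e2 : (c :: rest).getD (1 + a - 1) ' ' = c := by
      have h3 : 1 + a - 1 = a := by omega
      rw [h3]; exact hA _ (by omega)
    simp only [Function.comp_apply, pvBound, e1, e2, bne_self_eq_false, Bool.or_false,
      Bool.or_eq_true, beq_iff_eq]
    omega
  have h2 : List.filter (pvBound (c :: rest) (c :: rest).length)
        ((List.range (t.length + 1)).map (fun x => k + x))
      = (pvBounds t).map (fun x => x + k) := by
    rw [List.filter_map]
    unfold pvBounds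
    rw [List.filter_congr (q := pvBound t t.length) ?_]
    · exact List.map_congr_left (fun a _ => Nat.add_comm k a)
    · intro j hj
      simp only [List.mem_range] at hj
      show pvBound (c :: rest) (c :: rest).length (k + j) = pvBound t t.length j
      cases j with
      | zero =>
        cases htt : t with
        | nil =>
          have hnk : (c :: rest).length = k := by rw [hlen, htt]; simp
          simp [pvBound, hnk]
        | cons x t' =>
          have hx : (x == c) = false := by
            have h := List.head?_dropWhile_not (· == c) rest
            rw [← ht, htt] at h
            simpa using h
          have e1 : (c :: rest).getD (k + 0) ' ' = x := by rw [hB 0, htt]; rfl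
          have e2 : (c :: rest).getD (k + 0 - 1) ' ' = c := by
            have h3 : k + 0 - 1 = k - 1 := by omega
            rw [h3]; exact hA _ (by omega)
          have hbne : ((c :: rest).getD (k + 0) ' ' != (c :: rest).getD (k + 0 - 1) ' ') = true := by
            rw [e1, e2]
            simp [bne, hx]
          unfold pvBound
          rw [hbne]
          simp
      | succ j' =>
        have e1 : (c :: rest).getD (k + (j' + 1)) ' ' = t.getD (j' + 1) ' ' := hB _
        have e2 : (c :: rest).getD (k + (j' + 1) - 1) ' ' = t.getD j' ' ' := by
          have h3 : k + (j' + 1) - 1 = k + j' := by omega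
          rw [h3]; exact hB j'
        have e0 : ((k + (j' + 1) == 0)) = false := by
          simp [hk]
        have e3 : ((k + (j' + 1) == (c :: rest).length)) = ((j' + 1 == t.length)) := by
          rw [hlen]
          by_cases h : j' + 1 = t.length
          · simp [h]
          · simp [h]
        unfold pvBound
        rw [e1, show k + (j' + 1) - 1 = k + j' from by omega, hB j', e0, e3]
        simp
  conv_lhs => rw [pvBounds, hng, List.range_add, List.filter_append, h1, h2]
  rfl

-- per-pair slice shift: slicing s at shifted bounds is slicing t
lemma slice_shift (c : Char) (rest : List Char) (p : Nat × Nat) :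
    (((c :: rest).drop (p.1 + ((rest.takeWhile (· == c)).length + 1))).take
        ((p.2 + ((rest.takeWhile (· == c)).length + 1)) - (p.1 + ((rest.takeWhile (· == c)).length + 1))))
      = ((rest.dropWhile (· == c)).drop p.1).take (p.2 - p.1) := by
  set w := rest.takeWhile (· == c) with hw
  set t := rest.dropWhile (· == c) with ht
  set k := w.length + 1 with hk
  have hs : c :: rest = (c :: w) ++ t := by
    simp [hw, ht, List.takeWhile_append_dropWhile]
  have hd : (c :: rest).drop (p.1 + k) = t.drop p.1 := by
    rw [hs, List.drop_append, List.drop_eq_nil_of_le (by simp only [List.length_cons]; omega)]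
    simp only [List.length_cons, List.nil_append]
    congr 1
    omega
  rw [hd]
  congr 1
  omega

-- main lemma: A's recursion equals B's staged computation
lemma go_eq_alt (l : List Char) : find_reps_go l = find_reps_alt_list l := by
  suffices H : ∀ (n : Nat) (l : List Char), l.length ≤ n →
      find_reps_go l = find_reps_alt_list l from H l.length l le_rfl
  intro n
  induction n with
  | zero =>
    intro l h
    have hnil : l = [] := List.eq_nil_of_length_eq_zero (Nat.le_zero.mp h)
    subst hnil
    rw [find_reps_go.eq_def]; rfl
  | succ n ih =>
    intro l h
    cases l with
    | nil => rw [find_reps_go.eq_def]; rfl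
    | cons c rest =>
      set w := rest.takeWhile (· == c) with hw
      set t := rest.dropWhile (· == c) with ht
      set k := w.length + 1 with hk
      have hs : c :: rest = (c :: w) ++ t := by
        simp [hw, ht, List.takeWhile_append_dropWhile]
      have hts : t.length ≤ n := by
        have h1 := List.length_dropWhile_le (· == c) rest
        rw [← ht] at h1
        simp at h
        omega
      have iht := ih t hts
      have hcount : find_reps_run_count c rest + 1 = k := by
        rw [run_count_eq_takeWhile, ← hw]
      have hdrop : rest.drop (k - 1) = t := by
        have h1 := drop_run_count c rest
        rw [run_count_eq_takeWhile, ← hw] at h1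
        rw [← ht] at h1
        simpa [hk] using h1
      have htake : (c :: rest).take k = List.replicate k c := by
        have hwc : ∀ x ∈ (c :: w), x = c := by
          intro x hx
          rcases List.mem_cons.mp hx with h1 | h1
          · exact h1
          · rw [hw] at h1
            have h2 : (x == c) = true := List.mem_takeWhile_imp (p := fun y => y == c) h1
            exact beq_iff_eq.mp h2
        have hl : (c :: w).length = k := by simp [hk]
        rw [hs, List.take_append, hl, Nat.sub_self, List.take_zero, List.append_nil,
          List.take_of_length_le (le_of_eq hl)]
        rw [← hl]
        exact List.eq_replicate_of_mem hwc
      have hAside : find_reps_go (c :: rest)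
          = (if 3 ≤ k then [String.mk (List.replicate k c)] else []) ++ find_reps_go t := by
        rw [find_reps_go.eq_def]
        simp only [hcount, hdrop]
      rw [hAside, iht]
      -- B side
      unfold find_reps_alt_list
      rw [pvBounds_cons c rest, ← hw, ← ht, ← hk, pvBounds_head t]
      set B1 := List.filter (pvBound t t.length) ((List.range t.length).map (fun x => 1 + x)) with hB1
      set Z := List.zip (0 :: B1) B1 with hZ
      have hzip : List.zip (0 :: (0 :: B1).map (· + k)) ((0 :: B1).map (· + k))
          = (0, 0 + k) :: (Z.map (Prod.map (· + k) (· + k))) := by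
        rw [hZ, ← List.zip_map]
        simp [List.map_cons, List.zip_cons_cons]
      simp only [List.tail_cons, hzip, List.filter_cons]
      rw [List.filter_map, List.filter_congr (l := Z)
        (p := ((fun p : Nat × Nat => decide (3 ≤ p.2 - p.1)) ∘ Prod.map (· + k) (· + k)))
        (q := fun p : Nat × Nat => decide (3 ≤ p.2 - p.1))
        (by intro p _; simp [Prod.map, Nat.add_sub_add_right])]
      by_cases h3 : 3 ≤ k
      · rw [if_pos h3, if_pos (show decide (3 ≤ 0 + k - 0) = true by simpa using h3)]
        simp only [List.map_cons, List.map_map, List.singleton_append]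
        congr 1
        · simp [htake]
        · refine (List.map_congr_left (fun p _ => ?_))
          simp only [Function.comp_apply]
          congr 1
          exact (slice_shift c rest p).symm
      · rw [if_neg h3, if_neg (show ¬ (decide (3 ≤ 0 + k - 0) = true) by simpa using h3)]
        simp only [List.map_map, List.nil_append]
        refine (List.map_congr_left (fun p _ => ?_))
        simp only [Function.comp_apply]
        congr 1
        exact (slice_shift c rest p).symm

-- ===== VERDICT (by name: the statement is the Claim_ definition above) =====
theorem find_repetitions_py_spec : Claim_equal_find_repetitions_py := by
  intro password _
  unfold Spec_find_repetitions_py find_repetitions_py find_repetitions_py_alt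
  rw [go_eq_alt]; rfl
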